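-- pv_equiv track=rewrite | github.com/Darshil-Solanki/LeetCode | contest/makeArrayNonDecreasing.py | maximumPossibleSize
-- ===== SOURCE A (Python) =====
-- from typing import List
--
-- def maximumPossibleSize(nums: List[int]) -> int:
--     ans = 1
--     last_smallest = nums[0]
--
--     for i in range(1, len(nums)):
--         if nums[i]<last_smallest:
--             continue
--         elif nums[i]==last_smallest:
--             ans+=1
--         else:
--             ans += 1
--             last_smallest = nums[i]
--
--     return ans
-- ===== SOURCE B (Python) =====
-- from typing import List
--
-- def maximumPossibleSize(nums: List[int]) -> int:
--     # Divide and conquer: rec(seg, bound) = (number of elements in seg that are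
--     # >= bound and >= every earlier element of seg, max of seg).
--     def rec(seg, bound):
--         if len(seg) == 1:
--             return ((1 if seg[0] >= bound else 0), seg[0])
--         m = len(seg) // 2
--         c1, m1 = rec(seg[:m], bound)
--         c2, m2 = rec(seg[m:], max(bound, m1))
--         return (c1 + c2, max(m1, m2))
--     return rec(nums, nums[0])[0]
-- ===== Notes on version B (the rewrite author's own statement) =====
-- stated objective: alternative
-- what changed: Replaces A's left-to-right greedy pass carrying a running last-value with a divide-and-conquer recursion that splits the list in half and combines (count, max) pairs, threading the left half's maximum as the right half's bound.
import Mathlib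
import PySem

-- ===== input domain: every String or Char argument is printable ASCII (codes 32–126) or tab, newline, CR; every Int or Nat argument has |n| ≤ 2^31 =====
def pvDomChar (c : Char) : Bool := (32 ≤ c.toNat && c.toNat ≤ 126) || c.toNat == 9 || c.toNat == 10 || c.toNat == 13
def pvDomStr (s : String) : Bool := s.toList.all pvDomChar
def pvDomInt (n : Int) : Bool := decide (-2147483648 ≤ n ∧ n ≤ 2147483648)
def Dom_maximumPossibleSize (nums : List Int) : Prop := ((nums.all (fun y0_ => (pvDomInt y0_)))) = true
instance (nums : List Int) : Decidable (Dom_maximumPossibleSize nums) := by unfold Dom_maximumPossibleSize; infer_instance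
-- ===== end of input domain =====

-- B replaces A's greedy left-to-right pass with a divide-and-conquer recursion combining (count, max) pairs (alternative decomposition, same cost).
-- Pre_ excludes the empty list, on which both Pythons raise IndexError.


-- ===== PORT A =====
-- A's for-loop over nums[1:], carrying (ans, last_smallest), branches in source order
def pvLoopA : List Int → Int → Int → Int
  | [], ans, _ => ans
  | x :: t, ans, last =>
    if x < last then pvLoopA t ans last
    else if x == last then pvLoopA t (ans + 1) last
    else pvLoopA t (ans + 1) x

def maximumPossibleSize (nums : List Int) : Int :=
  match nums with
  | [] => 0          -- Python raises IndexError here (nums[0]); excluded by Pre_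
  | h :: t => pvLoopA t 1 h

-- ===== PORT B =====
-- Source B's rec(seg, bound): split seg in half, combine (count, max); bound of the
-- right half is max(bound, max of left half). The [] case is unreachable from
-- maximumPossibleSize_alt on nonempty input (a totality guard only).
def pvRecB : List Int → Int → Int × Int
  | [], _ => (0, 0)
  | [x], b => ((if b ≤ x then 1 else 0), x)
  | x :: y :: t, b =>
    let l := x :: y :: t
    let m := l.length / 2
    let p1 := pvRecB (l.take m) b
    let p2 := pvRecB (l.drop m) (max b p1.2)
    (p1.1 + p2.1, max p1.2 p2.2)
termination_by l _ => l.length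
decreasing_by
  · simp only [List.length_take]; simp [List.length]; omega
  · simp only [List.length_drop]; simp [List.length]; omega

def maximumPossibleSize_alt (nums : List Int) : Int :=
  match nums with
  | [] => 0          -- Python raises IndexError here (nums[0]); excluded by Pre_
  | h :: t => (pvRecB (h :: t) h).1

-- ===== PRECONDITION & SPEC =====
-- Pre_ excludes only the empty list, on which A raises IndexError (nums[0]).
def Pre_maximumPossibleSize (nums : List Int) : Prop := nums ≠ []
instance (nums : List Int) : Decidable (Pre_maximumPossibleSize nums) := by unfold Pre_maximumPossibleSize; infer_instance
def pvWitness_maximumPossibleSize : List Int := [2, 1, 3]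

def Spec_maximumPossibleSize (nums : List Int) (out : Int) : Prop := out = maximumPossibleSize_alt nums
instance (nums : List Int) (out : Int) : Decidable (Spec_maximumPossibleSize nums out) := by unfold Spec_maximumPossibleSize; infer_instance

-- ===== CLAIM (what is proved, stated in full; the proofs are below) =====
def Claim_equal_maximumPossibleSize : Prop := ∀ (nums : List Int), Dom_maximumPossibleSize nums → Pre_maximumPossibleSize nums → Spec_maximumPossibleSize nums (maximumPossibleSize nums)

-- ===== LEMMAS AND PROOFS =====
-- sequential specification of rec's count component
def pvGCount : List Int → Int → Int
  | [], _ => 0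
  | x :: t, b => (if b ≤ x then 1 else 0) + pvGCount t (max b x)

theorem pvGCount_append (L R : List Int) : ∀ b,
    pvGCount (L ++ R) b = pvGCount L b + pvGCount R (L.foldl max b) := by
  induction L with
  | nil => intro b; simp [pvGCount]
  | cons x t ih => intro b; simp [pvGCount, ih]; omega

theorem pvRecB_spec : ∀ (n : Nat) (l : List Int), l.length = n → l ≠ [] → ∀ b,
    (pvRecB l b).1 = pvGCount l b ∧ ∀ c, max c (pvRecB l b).2 = l.foldl max c := by
  intro n
  induction n using Nat.strong_induction_on with
  | _ n ih =>
    intro l hlen hne b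
    match l, hlen with
    | [x], _ =>
      refine ⟨by simp [pvRecB, pvGCount], fun c => by simp [pvRecB]⟩
    | x :: y :: t, hlen =>
      rw [pvRecB]
      set l := x :: y :: t with hl
      have hlen2 : 2 ≤ l.length := by simp [hl, List.length]
      set m := l.length / 2 with hm
      have hm1 : 1 ≤ m := by omega
      have hmlt : m < l.length := by omega
      have hLlen : (l.take m).length = m := by simp; omega
      have hRlen : (l.drop m).length = l.length - m := by simp
      have hLne : l.take m ≠ [] := by
        intro h; have := congrArg List.length h; simp [hLlen] at this; omega
      have hRne : l.drop m ≠ [] := by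
        intro h; have := congrArg List.length h; simp at this; omega
      have ihL := ih m (by omega) (l.take m) hLlen hLne b
      have ihR := ih (l.length - m) (by omega) (l.drop m) hRlen hRne
        (max b (pvRecB (l.take m) b).2)
      constructor
      · have hg : pvGCount l b
            = pvGCount (l.take m) b + pvGCount (l.drop m) (List.foldl max b (l.take m)) := by
          conv_lhs => rw [← List.take_append_drop m l]
          exact pvGCount_append _ _ b
        rw [hg, ihL.1, ihR.1, ihL.2 b]
      · intro c
        have h2 : List.foldl max c l
            = List.foldl max (List.foldl max c (l.take m)) (l.drop m) := by
          conv_lhs => rw [← List.take_append_drop m l]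
          exact List.foldl_append
        have h1 : max c (max (pvRecB (l.take m) b).2 (pvRecB (l.drop m) (max b (pvRecB (l.take m) b).2)).2)
            = max (max c (pvRecB (l.take m) b).2) (pvRecB (l.drop m) (max b (pvRecB (l.take m) b).2)).2 := by
          rw [max_assoc]
        rw [h1, ihR.2, ihL.2 c, h2]

theorem pvLoopA_gcount (t : List Int) : ∀ (ans last : Int),
    pvLoopA t ans last = ans + pvGCount t last := by
  induction t with
  | nil => intro ans last; simp [pvLoopA, pvGCount]
  | cons x s ih =>
    intro ans last
    simp only [pvLoopA, pvGCount]
    by_cases hlt : x < last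
    · have : ¬ last ≤ x := by omega
      simp [hlt, this, ih, max_eq_left (le_of_lt hlt)]
    · by_cases heq : x = last
      · subst heq
        simp [ih]
        omega
      · have hgt : last < x := by omega
        have hb : (x == last) = false := by simp [heq]
        simp [hlt, hb, ih, le_of_lt hgt]
        omega

-- ===== VERDICT (by name: the statement is the Claim_ definition above) =====
theorem maximumPossibleSize_spec : Claim_equal_maximumPossibleSize := by
  intro nums _ hpre
  unfold Spec_maximumPossibleSize
  match nums with
  | [] => exact absurd rfl hpre
  | h :: t =>
    have hs := pvRecB_spec (h :: t).length (h :: t) rfl (by simp) h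
    simp only [maximumPossibleSize, maximumPossibleSize_alt, hs.1, pvGCount, pvLoopA_gcount]
    simp
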